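-- pv_equiv track=rewrite | github.com/leizov/Seal-Playerok-Bot | tgbot/handlers/states_system.py | _serialize_cookie_map
-- ===== SOURCE A (Python) =====
-- def _serialize_cookie_map(cookie_map: dict[str, str]) -> str:
--     if not cookie_map:
--         return ""
--     ordered_keys: list[str] = []
--     if "token" in cookie_map:
--         ordered_keys.append("token")
--     if "auid" in cookie_map and "auid" not in ordered_keys:
--         ordered_keys.append("auid")
--     for key in sorted(cookie_map.keys()):
--         if key not in ordered_keys:
--             ordered_keys.append(key)
--     return "; ".join(f"{key}={cookie_map[key]}" for key in ordered_keys)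
-- ===== SOURCE B (Python) =====
-- def _serialize_cookie_map(cookie_map: dict[str, str]) -> str:
--     return "; ".join(
--         f"{key}={cookie_map[key]}"
--         for key in sorted(
--             cookie_map,
--             key=lambda k: (0 if k == "token" else 1 if k == "auid" else 2, k),
--         )
--     )
-- ===== Notes on version B (the rewrite author's own statement) =====
-- stated objective: simpler
-- what changed: The priority placement of 'token'/'auid' is encoded in a composite sort key handed to one sorted() call instead of being built imperatively via branches, an ordered_keys list and a membership-filtered loop (whose 'key not in ordered_keys' list scan is quadratic); the empty-dict guard disappears because joining an empty sequence already yields ''.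
import Mathlib
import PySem

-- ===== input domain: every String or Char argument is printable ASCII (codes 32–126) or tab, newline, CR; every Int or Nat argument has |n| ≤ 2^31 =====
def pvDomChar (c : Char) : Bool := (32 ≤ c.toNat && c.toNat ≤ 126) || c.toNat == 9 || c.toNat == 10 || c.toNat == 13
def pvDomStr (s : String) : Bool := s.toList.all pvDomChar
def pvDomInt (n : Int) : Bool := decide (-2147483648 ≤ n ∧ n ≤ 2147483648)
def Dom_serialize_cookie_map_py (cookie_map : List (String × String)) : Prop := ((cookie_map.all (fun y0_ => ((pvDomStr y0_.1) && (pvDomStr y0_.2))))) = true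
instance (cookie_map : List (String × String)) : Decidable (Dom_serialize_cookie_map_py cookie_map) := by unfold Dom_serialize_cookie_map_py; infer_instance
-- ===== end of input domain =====

-- B re-encodes the 'token'/'auid' priority as a composite sort key in one sorted() call instead of
-- A's imperative ordered_keys construction (branches + membership-filtered loop); simpler, return value only.

-- ===== PORT A =====
def serialize_cookie_map_py (cookie_map : List (String × String)) : String :=
  let d := PySem.Dict.ofList cookie_map
  if d.size = 0 then ""
  else
    let ordered1 : List String := if d.contains "token" then [] ++ ["token"] else []
    let ordered2 : List String :=
      if d.contains "auid" && !(ordered1.contains "auid") then ordered1 ++ ["auid"] else ordered1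
    let ordered3 :=
      (PySem.List.sorted d.keys (fun k => k) false).foldl
        (fun acc key => if acc.contains key then acc else acc ++ [key]) ordered2
    PySem.Str.join "; " (ordered3.map (fun key => key ++ "=" ++ d.getD key ""))

-- ===== PORT B =====
-- the composite-key ranks: 0 for "token", 1 for "auid", 2 otherwise
def pvRank (k : String) : Int := if k == "token" then 0 else if k == "auid" then 1 else 2

def serialize_cookie_map_py_alt (cookie_map : List (String × String)) : String :=
  let d := PySem.Dict.ofList cookie_map
  PySem.Str.join "; "
    ((PySem.List.sorted2 d.keys pvRank (fun k => k) false).map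
      (fun key => key ++ "=" ++ d.getD key ""))

-- ===== PRECONDITION & SPEC =====
def Spec_serialize_cookie_map_py (cookie_map : List (String × String)) (out : String) : Prop := out = serialize_cookie_map_py_alt cookie_map
instance (cookie_map : List (String × String)) (out : String) : Decidable (Spec_serialize_cookie_map_py cookie_map out) := by unfold Spec_serialize_cookie_map_py; infer_instance

-- ===== CLAIM (what is proved, stated in full; the proofs are below) =====
def Claim_equal_serialize_cookie_map_py : Prop := ∀ (cookie_map : List (String × String)), Dom_serialize_cookie_map_py cookie_map → Spec_serialize_cookie_map_py cookie_map (serialize_cookie_map_py cookie_map)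

-- ===== LEMMAS AND PROOFS =====

-- the strict comparison sorted2 uses for (pvRank, identity) composite keys
def pvB4 (a b : String) : Bool :=
  decide (pvRank a < pvRank b) || (!(decide (pvRank b < pvRank a)) && decide (a < b))

theorem pvRank_cases (k : String) : pvRank k = 0 ∨ pvRank k = 1 ∨ pvRank k = 2 := by
  unfold pvRank; split_ifs <;> simp

theorem pvB4_asymm {a b : String} (h : pvB4 a b = true) : pvB4 b a = false := by
  unfold pvB4 at h ⊢
  simp only [Bool.or_eq_true, Bool.and_eq_true, Bool.not_eq_true', decide_eq_true_eq,
    decide_eq_false_iff_not, Bool.or_eq_false_iff, Bool.and_eq_false_iff,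
    Bool.not_eq_false', decide_eq_true_eq] at h ⊢
  rcases h with h | ⟨h1, h2⟩
  · exact ⟨not_lt_of_gt h, Or.inl h⟩
  · exact ⟨h1, Or.inr (not_lt_of_gt h2)⟩

theorem pvB4_total {a b : String} (h1 : pvB4 a b = false) (h2 : pvB4 b a = false) : a = b := by
  unfold pvB4 at h1 h2
  simp only [Bool.or_eq_false_iff, Bool.and_eq_false_iff, Bool.not_eq_false',
    decide_eq_true_eq, decide_eq_false_iff_not] at h1 h2
  rcases h1 with ⟨hr1, hc1⟩; rcases h2 with ⟨hr2, hc2⟩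
  rcases hc1 with h | h
  · exact absurd h hr2
  · rcases hc2 with h' | h'
    · exact absurd h' hr1
    · exact le_antisymm (not_lt.mp h') (not_lt.mp h)

theorem pvB4_trans {a b c : String} (h1 : pvB4 a b = true) (h2 : pvB4 b c = true) : pvB4 a c = true := by
  unfold pvB4 at h1 h2 ⊢
  simp only [Bool.or_eq_true, Bool.and_eq_true, Bool.not_eq_true', decide_eq_true_eq,
    decide_eq_false_iff_not] at h1 h2 ⊢
  rcases h1 with h1 | ⟨h1a, h1b⟩ <;> rcases h2 with h2 | ⟨h2a, h2b⟩
  · exact Or.inl (lt_trans h1 h2)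
  · exact Or.inl (lt_of_lt_of_le h1 (not_lt.mp h2a))
  · exact Or.inl (lt_of_le_of_lt (not_lt.mp h1a) h2)
  · exact Or.inr ⟨fun hc => h2a (lt_of_lt_of_le hc (not_lt.mp h1a)), lt_trans h1b h2b⟩

-- le relation: "b is not strictly before a"
theorem pairwise_le_insertBy (x : String) (ys : List String)
    (h : ys.Pairwise (fun a b => pvB4 b a = false)) :
    (PySem.List.insertBy pvB4 x ys).Pairwise (fun a b => pvB4 b a = false) := by
  induction ys with
  | nil => simp [PySem.List.insertBy]
  | cons y ys ih =>
    rw [List.pairwise_cons] at h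
    obtain ⟨h1, h2⟩ := h
    by_cases hb : pvB4 x y = true
    · rw [show PySem.List.insertBy pvB4 x (y :: ys) = x :: y :: ys by
        simp [PySem.List.insertBy, hb]]
      refine List.pairwise_cons.mpr ⟨?_, List.pairwise_cons.mpr ⟨h1, h2⟩⟩
      intro z hz
      rcases hz with _ | hz
      · exact pvB4_asymm hb
      · by_contra hc
        have hzx : pvB4 z x = true := by
          revert hc; cases pvB4 z x <;> simp
        have := pvB4_trans hzx hb
        have hzy := h1 z (by assumption)
        rw [this] at hzy; exact Bool.true_eq_false.mp hzy
    · have hb' : pvB4 x y = false := by revert hb; cases pvB4 x y <;> simp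
      rw [show PySem.List.insertBy pvB4 x (y :: ys) = y :: PySem.List.insertBy pvB4 x ys by
        simp [PySem.List.insertBy, hb']]
      refine List.pairwise_cons.mpr ⟨?_, ih h2⟩
      intro w hw
      rcases (PySem.List.insertBy_mem_iff pvB4 x w ys).mp hw with rfl | hw'
      · exact hb'
      · exact h1 w hw'

theorem pairwise_le_foldl (xs : List String) (acc : List String)
    (h : acc.Pairwise (fun a b => pvB4 b a = false)) :
    (xs.foldl (fun a x => PySem.List.insertBy pvB4 x a) acc).Pairwise
      (fun a b => pvB4 b a = false) := by
  induction xs generalizing acc with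
  | nil => exact h
  | cons x xs ih => exact ih _ (pairwise_le_insertBy x acc h)

theorem sorted2_eq_of_perm_of_pairwise (xs ys : List String)
    (hp : ys.Perm xs) (hpw : ys.Pairwise (fun a b => pvB4 a b = true)) :
    PySem.List.sorted2 xs pvRank (fun k => k) false = ys := by
  have hdef : PySem.List.sorted2 xs pvRank (fun k => k) false
      = xs.foldl (fun a x => PySem.List.insertBy pvB4 x a) [] := by
    rfl
  rw [hdef]
  have hres_perm : (xs.foldl (fun a x => PySem.List.insertBy pvB4 x a) []).Perm xs := by
    have := PySem.List.sorted2_perm xs pvRank (fun k => k) false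
    rwa [hdef] at this
  have hres_pw := pairwise_le_foldl xs [] (by simp)
  have hys_pw : ys.Pairwise (fun a b => pvB4 b a = false) :=
    hpw.imp (fun h => pvB4_asymm h)
  exact List.eq_of_perm_of_sorted (le := fun a b => pvB4 b a = false)
    (fun a b _ _ h1 h2 => pvB4_total h2 h1) hres_pw hys_pw (hres_perm.trans hp.symm)

theorem dedupAppend (sk : List String) (pre : List String) (h : sk.Nodup) :
    sk.foldl (fun acc k => if acc.contains k then acc else acc ++ [k]) pre
      = pre ++ sk.filter (fun k => !pre.contains k) := by
  induction sk generalizing pre with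
  | nil => simp
  | cons k sk ih =>
    rw [List.nodup_cons] at h
    obtain ⟨hk, hnd⟩ := h
    by_cases hc : pre.contains k = true
    · simp only [List.foldl_cons, if_true, List.filter_cons, hc, Bool.not_true]
      exact ih pre hnd
    · have hc' : pre.contains k = false := by revert hc; cases pre.contains k <;> simp
      simp only [List.foldl_cons, hc', if_false, Bool.false_eq_true, List.filter_cons,
        Bool.not_false]
      rw [ih (pre ++ [k]) hnd]
      rw [List.append_assoc]
      congr 1
      rw [List.singleton_append]
      congr 1
      apply List.filter_congr
      intro x hx
      have hxk : x ≠ k := fun hxe => hk (hxe ▸ hx)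
      simp [hxk]

-- every element of the filtered tail has rank 2; pre holds exactly the rank-≤1 keys
theorem general_ordered (ks pre : List String) (hnd : ks.Nodup)
    (hpre_nd : pre.Nodup)
    (hpre_pw : pre.Pairwise (fun a b => pvB4 a b = true))
    (hpre_sub : ∀ x ∈ pre, x ∈ ks)
    (hpre_low : ∀ x ∈ pre, pvRank x ≤ 1)
    (hcover : ∀ x ∈ ks, pvRank x ≤ 1 → x ∈ pre) :
    PySem.List.sorted2 ks pvRank (fun k => k) false
      = pre ++ (PySem.List.sorted ks (fun k => k) false).filter (fun k => !pre.contains k) := by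
  set sk := PySem.List.sorted ks (fun k => k) false with hsk
  have hsk_perm : sk.Perm ks := PySem.List.sorted_perm ks (fun k => k) false
  have hsk_nd : sk.Nodup := hsk_perm.nodup_iff.mpr hnd
  have hsk_le : sk.Pairwise (fun a b => a ≤ b) := by
    have := PySem.List.sorted_pairwise ks (fun k => k)
    simpa using this
  have hsk_lt : sk.Pairwise (fun a b => a < b) :=
    (hsk_le.and hsk_nd).imp (fun ⟨h1, h2⟩ => lt_of_le_of_ne h1 h2)
  -- rank of filtered elements is 2
  have hfilt_rank : ∀ x ∈ sk.filter (fun k => !pre.contains k), pvRank x = 2 := by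
    intro x hx
    rw [List.mem_filter] at hx
    obtain ⟨hx1, hx2⟩ := hx
    have hxks : x ∈ ks := hsk_perm.mem_iff.mp hx1
    have hxnp : x ∉ pre := by
      intro hm
      have : pre.contains x = true := List.elem_eq_true_of_mem hm
      rw [this] at hx2; simp at hx2
    rcases pvRank_cases x with h | h | h
    · exact absurd (hcover x hxks (by omega)) hxnp
    · exact absurd (hcover x hxks (by omega)) hxnp
    · exact h
  apply sorted2_eq_of_perm_of_pairwise
  · -- permutation
    have hmemf : ∀ a, a ∈ sk.filter (fun k => pre.contains k) ↔ a ∈ pre := by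
      intro a
      rw [List.mem_filter]
      constructor
      · rintro ⟨_, h2⟩; exact List.mem_of_elem_eq_true h2
      · intro h
        exact ⟨hsk_perm.mem_iff.mpr (hpre_sub a h), List.elem_eq_true_of_mem h⟩
    have hpre_perm : pre.Perm (sk.filter (fun k => pre.contains k)) :=
      (List.perm_ext_iff_of_nodup hpre_nd (hsk_nd.filter _)).mpr
        (fun a => (hmemf a).symm)
    exact (hpre_perm.append_right _).trans ((List.filter_append_perm _ sk).trans hsk_perm)
  · -- pairwise strictly-before
    rw [List.pairwise_append]
    refine ⟨hpre_pw, ?_, ?_⟩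
    · refine (hsk_lt.filter _).imp_of_mem ?_
      intro a b ha hb hlt
      have hra := hfilt_rank a ha
      have hrb := hfilt_rank b hb
      unfold pvB4
      simp only [Bool.or_eq_true, Bool.and_eq_true, Bool.not_eq_true', decide_eq_true_eq,
        decide_eq_false_iff_not]
      exact Or.inr ⟨by rw [hra, hrb]; omega, hlt⟩
    · intro a ha b hb
      have hra := hpre_low a ha
      have hrb := hfilt_rank b hb
      unfold pvB4
      simp only [Bool.or_eq_true, decide_eq_true_eq]
      exact Or.inl (by omega)

theorem pvRank_le_one (x : String) (h : pvRank x ≤ 1) : x = "token" ∨ x = "auid" := by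
  unfold pvRank at h
  split_ifs at h with h1 h2
  · exact Or.inl (by simpa using h1)
  · exact Or.inr (by simpa using h2)
  · omega

theorem ordered_eq (ks : List String) (hnd : ks.Nodup) (bt ba : Bool)
    (hbt : bt = true ↔ "token" ∈ ks) (hba : ba = true ↔ "auid" ∈ ks) :
    (PySem.List.sorted ks (fun k => k) false).foldl
        (fun acc key => if acc.contains key then acc else acc ++ [key])
        ((if bt then ([] : List String) ++ ["token"] else []) ++ (if ba then ["auid"] else []))
      = PySem.List.sorted2 ks pvRank (fun k => k) false := by
  set pre : List String :=
    (if bt then ([] : List String) ++ ["token"] else []) ++ (if ba then ["auid"] else []) with hpre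
  have hsk_nd : (PySem.List.sorted ks (fun k => k) false).Nodup :=
    (PySem.List.sorted_perm ks (fun k => k) false).nodup_iff.mpr hnd
  rw [dedupAppend _ _ hsk_nd]
  refine (general_ordered ks pre hnd ?_ ?_ ?_ ?_ ?_).symm
  · cases bt <;> cases ba <;> simp [hpre]
  · cases bt <;> cases ba <;> simp [hpre] <;> decide
  · intro x hx
    rw [hpre] at hx
    rcases List.mem_append.mp hx with h | h
    · cases hb : bt with
      | false => rw [hb] at h; simp at h
      | true => rw [hb] at h; simp at h; subst h; exact hbt.mp hb
    · cases hb : ba with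
      | false => rw [hb] at h; simp at h
      | true => rw [hb] at h; simp at h; subst h; exact hba.mp hb
  · intro x hx
    rw [hpre] at hx
    rcases List.mem_append.mp hx with h | h
    · cases hb : bt with
      | false => rw [hb] at h; simp at h
      | true => rw [hb] at h; simp at h; subst h; decide
    · cases hb : ba with
      | false => rw [hb] at h; simp at h
      | true => rw [hb] at h; simp at h; subst h; decide
  · intro x hxks hxr
    rw [hpre]
    rcases pvRank_le_one x hxr with rfl | rfl
    · have : bt = true := hbt.mpr hxks
      rw [this]; simp
    · have : ba = true := hba.mpr hxks
      rw [this]; simp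

-- ===== VERDICT (by name: the statement is the Claim_ definition above) =====
theorem serialize_cookie_map_py_spec : Claim_equal_serialize_cookie_map_py := by
  intro cookie_map _
  unfold Spec_serialize_cookie_map_py serialize_cookie_map_py serialize_cookie_map_py_alt
  set d := PySem.Dict.ofList cookie_map with hd
  have hnd : d.keys.Nodup := PySem.Dict.nodup_keys_ofList cookie_map
  by_cases hsz : d.size = 0
  · have hkeys : d.keys = [] := by
      have : d.items = [] := List.length_eq_zero_iff.mp hsz
      simp [PySem.Dict.keys, this]
    simp [hsz, hkeys]
    rfl
  · simp only [hsz, if_false]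
    have h1 : (if d.contains "token" then ([] : List String) ++ ["token"] else []).contains "auid"
        = false := by
      cases h : d.contains "token" <;> simp
    rw [h1]
    have h2 : ∀ o1 : List String,
        (if d.contains "auid" && !false then o1 ++ ["auid"] else o1)
          = o1 ++ (if d.contains "auid" then ["auid"] else []) := by
      intro o1; cases h : d.contains "auid" <;> simp
    rw [h2]
    rw [ordered_eq d.keys hnd (d.contains "token") (d.contains "auid")
      (PySem.Dict.contains_iff_mem_keys d "token") (PySem.Dict.contains_iff_mem_keys d "auid")]
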